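-- pv_equiv track=rewrite | github.com/temaepilot-sys/dcs-sightseeing-helper | miz_route_builder.py | _split_coord_and_comment
-- ===== SOURCE A (Python) =====
-- from typing import Dict, List, Optional, Tuple
--
-- def _split_coord_and_comment(line: str) -> Tuple[str, Optional[str]]:
--     marker_idx = -1
--     marker_len = 0
--     for marker in ("//", "#", ";"):
--         idx = line.find(marker)
--         if idx != -1 and (marker_idx == -1 or idx < marker_idx):
--             marker_idx = idx
--             marker_len = len(marker)
--     if marker_idx == -1:
--         return line.strip(), None
--
--     coord_part = line[:marker_idx].strip()
--     comment = line[marker_idx + marker_len :].strip()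
--     if not comment:
--         return coord_part, None
--     return coord_part, (comment if comment else None)
-- ===== SOURCE B (Python) =====
-- def _split_coord_and_comment(line):
--     # One left-to-right scan for the earliest comment marker ('#', ';' or '//')
--     # instead of three separate .find() passes.
--     n = len(line)
--     for i, ch in enumerate(line):
--         if ch in "#;" or (ch == "/" and i + 1 < n and line[i + 1] == "/"):
--             width = 1 if ch in "#;" else 2
--             coord = line[:i].strip()
--             comment = line[i + width:].strip()
--             return coord, (comment or None)
--     return line.strip(), None
-- ===== Notes on version B (the rewrite author's own statement) =====
-- stated objective: simpler
-- what changed: Replaced the three separate line.find(marker) passes plus min-index bookkeeping by a single left-to-right character scan that stops at the first position where a marker ('#', ';' or '//') starts.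
import Mathlib
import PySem

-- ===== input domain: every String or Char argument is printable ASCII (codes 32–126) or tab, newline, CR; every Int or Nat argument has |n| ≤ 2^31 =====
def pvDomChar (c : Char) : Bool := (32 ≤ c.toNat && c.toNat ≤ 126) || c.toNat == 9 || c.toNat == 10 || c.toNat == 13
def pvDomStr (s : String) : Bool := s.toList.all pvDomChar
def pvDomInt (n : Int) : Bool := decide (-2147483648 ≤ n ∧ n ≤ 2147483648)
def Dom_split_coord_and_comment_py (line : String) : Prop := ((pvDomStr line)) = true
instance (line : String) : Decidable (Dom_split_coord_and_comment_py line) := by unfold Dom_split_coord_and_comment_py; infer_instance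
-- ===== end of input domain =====

-- B replaces A's three find() passes with one left-to-right scan for the earliest marker (simpler, single pass).

-- ===== PORT A =====
def split_coord_and_comment_py (line : String) : String × Option String :=
  let st := [("//" : String), "#", ";"].foldl
    (fun (st : Int × Int) marker =>
      let idx := PySem.Str.find line marker
      if idx ≠ -1 ∧ (st.1 = -1 ∨ idx < st.1) then (idx, (PySem.Str.len marker)) else st)
    (-1, 0)
  if st.1 = -1 then (PySem.Str.strip line, none)
  else
    let coord_part := PySem.Str.strip (PySem.Str.slice line none (some st.1))
    let comment := PySem.Str.strip (PySem.Str.slice line (some (st.1 + st.2)) none)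
    if comment = "" then (coord_part, none)
    else (coord_part, if comment = "" then none else some comment)

-- ===== PORT B =====
-- the scan loop of Source B: first index where '#', ';' or "//" starts, with the marker's width
def pvScanMarker : List Char → Nat → Option (Nat × Nat)
  | [], _ => none
  | c :: rest, i =>
    if c = '#' ∨ c = ';' then some (i, 1)
    else if c = '/' ∧ rest.head? = some '/' then some (i, 2)
    else pvScanMarker rest (i + 1)

def split_coord_and_comment_py_alt (line : String) : String × Option String :=
  match pvScanMarker line.toList 0 with
  | none => (PySem.Str.strip line, none)
  | some (i, w) =>
    let coord := PySem.Str.strip (PySem.Str.slice line none (some (i : Int)))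
    let comment := PySem.Str.strip (PySem.Str.slice line (some ((i + w : Nat) : Int)) none)
    (coord, if comment = "" then none else some comment)

-- ===== PRECONDITION & SPEC =====
def Spec_split_coord_and_comment_py (line : String) (out : String × Option String) : Prop := out = split_coord_and_comment_py_alt line
instance (line : String) (out : String × Option String) : Decidable (Spec_split_coord_and_comment_py line out) := by unfold Spec_split_coord_and_comment_py; infer_instance

-- ===== CLAIM (what is proved, stated in full; the proofs are below) =====
def Claim_equal_split_coord_and_comment_py : Prop := ∀ (line : String), Dom_split_coord_and_comment_py line → Spec_split_coord_and_comment_py line (split_coord_and_comment_py line)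

-- ===== LEMMAS AND PROOFS =====

-- marker starting at position j of s, with its width, if any
def pvMarkAt (s : List Char) (j : Nat) : Option Nat :=
  if s[j]? = some '#' ∨ s[j]? = some ';' then some 1
  else if s[j]? = some '/' ∧ s[j + 1]? = some '/' then some 2
  else none

theorem pvSingleton_prefix_drop {s : List Char} {c : Char} {j : Nat} :
    [c] <+: s.drop j ↔ s[j]? = some c := by
  constructor
  · rintro ⟨t, ht⟩
    have : (s.drop j).head? = some c := by rw [← ht]; rfl
    simpa [List.head?_drop] using this
  · intro h
    have hh : (s.drop j).head? = some c := by simpa [List.head?_drop] using h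
    cases hd : s.drop j with
    | nil => simp [hd] at hh
    | cons a t => simp [hd] at hh; exact ⟨t, by simp [hd, hh]⟩

theorem pvPair_prefix_drop {s : List Char} {c d : Char} {j : Nat} :
    [c, d] <+: s.drop j ↔ (s[j]? = some c ∧ s[j + 1]? = some d) := by
  constructor
  · rintro ⟨t, ht⟩
    constructor
    · have : (s.drop j).head? = some c := by rw [← ht]; rfl
      simpa [List.head?_drop] using this
    · have : (s.drop (j + 1)).head? = some d := by
        rw [← List.tail_drop, ← ht]; rfl
      simpa [List.head?_drop] using this
  · rintro ⟨h1, h2⟩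
    have hh1 : (s.drop j).head? = some c := by rw [List.head?_drop]; exact h1
    have hh2 : (s.drop j).tail.head? = some d := by
      rw [List.tail_drop, List.head?_drop]; exact h2
    cases hd : s.drop j with
    | nil => rw [hd] at hh1; simp at hh1
    | cons a t =>
      rw [hd] at hh1 hh2
      simp at hh1 hh2
      cases ht : t with
      | nil => rw [ht] at hh2; simp at hh2
      | cons b u =>
        rw [ht] at hh2; simp at hh2
        exact ⟨u, by simp [hd, ht, hh1, hh2]⟩

theorem pvMarkAt_none_iff {s : List Char} {j : Nat} :
    pvMarkAt s j = none ↔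
      ¬ ['#'] <+: s.drop j ∧ ¬ [';'] <+: s.drop j ∧ ¬ ['/', '/'] <+: s.drop j := by
  unfold pvMarkAt
  rw [pvSingleton_prefix_drop, pvSingleton_prefix_drop, pvPair_prefix_drop]
  split_ifs with h1 h2 <;> simp <;> tauto

-- the scan finds the first marker position (shifted by the start index)
theorem pvScanMarker_spec (s : List Char) (i : Nat) :
    (pvScanMarker s i = none → ∀ j, pvMarkAt s j = none) ∧
    (∀ k w, pvScanMarker s i = some (k, w) →
      ∃ j, k = i + j ∧ pvMarkAt s j = some w ∧ ∀ j' < j, pvMarkAt s j' = none) := by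
  induction s generalizing i with
  | nil =>
    refine ⟨fun _ j => ?_, fun k w h => by simp [pvScanMarker] at h⟩
    simp [pvMarkAt]
  | cons c rest ih =>
    have hshift : ∀ j, pvMarkAt (c :: rest) (j + 1) = pvMarkAt rest j := by
      intro j; rfl
    by_cases h1 : c = '#' ∨ c = ';'
    · refine ⟨fun h => by simp [pvScanMarker, h1] at h, fun k w h => ?_⟩
      simp [pvScanMarker, h1] at h
      exact ⟨0, by simp [h.1], by simp [pvMarkAt]; rcases h1 with h1 | h1 <;> simp [h1, ← h.2], by omega⟩
    · by_cases h2 : c = '/' ∧ rest.head? = some '/'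
      · refine ⟨fun h => by simp [pvScanMarker, h1, h2] at h, fun k w h => ?_⟩
        simp [pvScanMarker, h1, h2] at h
        obtain ⟨rfl, rfl⟩ := h
        obtain ⟨hc, hr⟩ := h2
        subst hc
        have h0 : rest[0]? = some '/' := by
          cases rest with
          | nil => simp at hr
          | cons b u => simpa using hr
        exact ⟨0, by omega, by simp [pvMarkAt, h0], by omega⟩
      · have hr0 : ¬ (c = '/' ∧ rest[0]? = some '/') := by
          rintro ⟨hc, hr⟩
          refine h2 ⟨hc, ?_⟩
          cases rest with
          | nil => simp at hr
          | cons b u => simpa using hr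
        have hmark0 : pvMarkAt (c :: rest) 0 = none := by
          simp [pvMarkAt]; rw [if_neg h1, if_neg hr0]
        have hstep : pvScanMarker (c :: rest) i = pvScanMarker rest (i + 1) := by
          simp [pvScanMarker, h1, h2]
        constructor
        · intro h j
          rw [hstep] at h
          cases j with
          | zero => exact hmark0
          | succ j => rw [hshift]; exact (ih (i+1)).1 h j
        · intro k w h
          rw [hstep] at h
          obtain ⟨j, hj, hm, hb⟩ := (ih (i+1)).2 k w h
          refine ⟨j + 1, by omega, by rw [hshift]; exact hm, ?_⟩
          intro j' hj'
          cases j' with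
          | zero => exact hmark0
          | succ j' => rw [hshift]; exact hb j' (by omega)

theorem pvFind_gt_of_no_prefix {s sub : List Char} {k : Nat}
    (h : ∀ j ≤ k, ¬ sub <+: s.drop j) :
    PySem.Chars.find s sub = -1 ∨ (k : Int) < PySem.Chars.find s sub := by
  by_cases hne : PySem.Chars.find s sub = -1
  · exact Or.inl hne
  · right
    have h0 : 0 ≤ PySem.Chars.find s sub := by
      have := PySem.Chars.neg_one_le_find (s := s) (sub := sub); omega
    obtain ⟨hp, _⟩ := PySem.Chars.find_spec h0
    by_contra hlt
    exact h (PySem.Chars.find s sub).toNat (by omega) hp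

theorem pvFind_eq_of_first {s sub : List Char} {k : Nat}
    (hk : sub <+: s.drop k) (hb : ∀ j < k, ¬ sub <+: s.drop j) :
    PySem.Chars.find s sub = (k : Int) := by
  have hin : sub <:+: s := by
    rw [← PySem.Chars.isIn_iff_infix, ← PySem.Chars.exists_prefix_drop_iff_isIn]
    exact ⟨k, hk⟩
  have h0 : 0 ≤ PySem.Chars.find s sub := (PySem.Chars.find_nonneg_iff s sub).mpr hin
  obtain ⟨hp, hmin⟩ := PySem.Chars.find_spec h0
  rcases Nat.lt_trichotomy (PySem.Chars.find s sub).toNat k with h | h | h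
  · exact absurd hp (hb _ h)
  · omega
  · exact absurd hk (hmin k h)

theorem pvFold_eq (line : String) :
    ([("//" : String), "#", ";"].foldl
      (fun (st : Int × Int) marker =>
        let idx := PySem.Str.find line marker
        if idx ≠ -1 ∧ (st.1 = -1 ∨ idx < st.1) then (idx, (PySem.Str.len marker)) else st)
      (-1, 0))
    = (match pvScanMarker line.toList 0 with
      | none => ((-1 : Int), (0 : Int))
      | some (k, w) => ((k : Int), (w : Int))) := by
  have hfind : ∀ m : String, PySem.Str.find line m = PySem.Chars.find line.toList m.toList :=
    fun m => by simp
  simp only [List.foldl, hfind]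
  have e2 : ("//" : String).toList = ['/', '/'] := rfl
  have e1 : ("#" : String).toList = ['#'] := rfl
  have e0 : (";" : String).toList = [';'] := rfl
  have l2 : PySem.Str.len "//" = 2 := rfl
  have l1 : PySem.Str.len "#" = 1 := rfl
  have l0 : PySem.Str.len ";" = 1 := rfl
  rw [e2, e1, e0, l2, l1, l0]
  set s := line.toList with hs
  cases h : pvScanMarker s 0 with
  | none =>
    have hall := (pvScanMarker_spec s 0).1 h
    have hno : ∀ j, ¬ ['#'] <+: s.drop j ∧ ¬ [';'] <+: s.drop j ∧ ¬ ['/', '/'] <+: s.drop j :=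
      fun j => pvMarkAt_none_iff.mp (hall j)
    have hf2 : PySem.Chars.find s ['/', '/'] = -1 := by
      rw [PySem.Chars.find_eq_neg_one_iff]
      intro hin
      obtain ⟨j, hj⟩ := (PySem.Chars.exists_prefix_drop_iff_isIn _ _).mpr
        ((PySem.Chars.isIn_iff_infix _ _).mpr hin)
      exact (hno j).2.2 hj
    have hf1 : PySem.Chars.find s ['#'] = -1 := by
      rw [PySem.Chars.find_eq_neg_one_iff]
      intro hin
      obtain ⟨j, hj⟩ := (PySem.Chars.exists_prefix_drop_iff_isIn _ _).mpr
        ((PySem.Chars.isIn_iff_infix _ _).mpr hin)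
      exact (hno j).1 hj
    have hf0 : PySem.Chars.find s [';'] = -1 := by
      rw [PySem.Chars.find_eq_neg_one_iff]
      intro hin
      obtain ⟨j, hj⟩ := (PySem.Chars.exists_prefix_drop_iff_isIn _ _).mpr
        ((PySem.Chars.isIn_iff_infix _ _).mpr hin)
      exact (hno j).2.1 hj
    simp [hf2, hf1, hf0]
  | some p =>
    obtain ⟨k, w⟩ := p
    obtain ⟨j, hj, hm, hb⟩ := (pvScanMarker_spec s 0).2 k w h
    have hjk : k = j := by omega
    subst hjk
    have hbefore : ∀ j < k, ¬ ['#'] <+: s.drop j ∧ ¬ [';'] <+: s.drop j ∧ ¬ ['/', '/'] <+: s.drop j :=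
      fun j hjlt => pvMarkAt_none_iff.mp (hb j hjlt)
    -- case on which marker starts at k
    unfold pvMarkAt at hm
    by_cases hcase : s[k]? = some '#' ∨ s[k]? = some ';'
    · rw [if_pos hcase] at hm
      have hw : w = 1 := by injection hm with hm; omega
      subst hw
      have hf2 : PySem.Chars.find s ['/', '/'] = -1 ∨ (k : Int) < PySem.Chars.find s ['/', '/'] := by
        apply pvFind_gt_of_no_prefix
        intro j hjle
        rcases Nat.lt_or_eq_of_le hjle with hlt | rfl
        · exact (hbefore j hlt).2.2
        · rw [pvPair_prefix_drop]
          rcases hcase with hc | hc <;> simp [hc]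
      rcases hcase with hc | hc
      · have hf1 : PySem.Chars.find s ['#'] = (k : Int) := by
          apply pvFind_eq_of_first (pvSingleton_prefix_drop.mpr hc)
          exact fun j hjlt => (hbefore j hjlt).1
        have hf0 : PySem.Chars.find s [';'] = -1 ∨ (k : Int) < PySem.Chars.find s [';'] := by
          apply pvFind_gt_of_no_prefix
          intro j hjle
          rcases Nat.lt_or_eq_of_le hjle with hlt | rfl
          · exact (hbefore j hlt).2.1
          · rw [pvSingleton_prefix_drop, hc]; simp
        rcases hf2 with hf2 | hf2 <;> rcases hf0 with hf0 | hf0 <;>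
          split_ifs <;> simp only [Prod.mk.injEq, true_or, false_or, and_true, true_and, ne_eq, not_not, not_and, not_or] at * <;> omega
      · have hf0 : PySem.Chars.find s [';'] = (k : Int) := by
          apply pvFind_eq_of_first (pvSingleton_prefix_drop.mpr hc)
          exact fun j hjlt => (hbefore j hjlt).2.1
        have hf1 : PySem.Chars.find s ['#'] = -1 ∨ (k : Int) < PySem.Chars.find s ['#'] := by
          apply pvFind_gt_of_no_prefix
          intro j hjle
          rcases Nat.lt_or_eq_of_le hjle with hlt | rfl
          · exact (hbefore j hlt).1
          · rw [pvSingleton_prefix_drop, hc]; simp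
        rcases hf2 with hf2 | hf2 <;> rcases hf1 with hf1 | hf1 <;>
          split_ifs <;> simp only [Prod.mk.injEq, true_or, false_or, and_true, true_and, ne_eq, not_not, not_and, not_or] at * <;> omega
    · rw [if_neg hcase] at hm
      by_cases hslash : s[k]? = some '/' ∧ s[k + 1]? = some '/'
      · rw [if_pos hslash] at hm
        have hw : w = 2 := by injection hm with hm; omega
        subst hw
        have hf2 : PySem.Chars.find s ['/', '/'] = (k : Int) := by
          apply pvFind_eq_of_first (pvPair_prefix_drop.mpr hslash)
          exact fun j hjlt => (hbefore j hjlt).2.2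
        have hf1 : PySem.Chars.find s ['#'] = -1 ∨ (k : Int) < PySem.Chars.find s ['#'] := by
          apply pvFind_gt_of_no_prefix
          intro j hjle
          rcases Nat.lt_or_eq_of_le hjle with hlt | rfl
          · exact (hbefore j hlt).1
          · rw [pvSingleton_prefix_drop, hslash.1]; simp
        have hf0 : PySem.Chars.find s [';'] = -1 ∨ (k : Int) < PySem.Chars.find s [';'] := by
          apply pvFind_gt_of_no_prefix
          intro j hjle
          rcases Nat.lt_or_eq_of_le hjle with hlt | rfl
          · exact (hbefore j hlt).2.1
          · rw [pvSingleton_prefix_drop, hslash.1]; simp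
        rcases hf1 with hf1 | hf1 <;> rcases hf0 with hf0 | hf0 <;>
          split_ifs <;> simp only [Prod.mk.injEq, true_or, false_or, and_true, true_and, ne_eq, not_not, not_and, not_or] at * <;> omega
      · rw [if_neg hslash] at hm; exact absurd hm (by simp)

-- ===== VERDICT (by name: the statement is the Claim_ definition above) =====
theorem split_coord_and_comment_py_spec : Claim_equal_split_coord_and_comment_py := by
  intro line _
  unfold Spec_split_coord_and_comment_py split_coord_and_comment_py split_coord_and_comment_py_alt
  rw [pvFold_eq]
  cases h : pvScanMarker line.toList 0 with
  | none => simp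
  | some p =>
    obtain ⟨k, w⟩ := p
    have hk : ((k : Int)) ≠ -1 := by omega
    have hcast : ((k : Int) + (w : Int)) = (((k + w : Nat)) : Int) := by push_cast; ring
    simp only [hk, if_false, hcast]
    split_ifs with hc <;> simp [hc]
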